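-- pv_equiv track=rewrite | github.com/posl/comment_recommendation | script/mod_gen/3_time/en/175_A/6.py | max_rainy_days
-- ===== SOURCE A (Python) =====
-- def max_rainy_days(s):
--     max_rainy_days = 0
--     rainy_days = 0
--     for i in range(len(s)):
--         if s[i] == 'R':
--             rainy_days += 1
--         else:
--             if rainy_days > max_rainy_days:
--                 max_rainy_days = rainy_days
--             rainy_days = 0
--     if rainy_days > max_rainy_days:
--         max_rainy_days = rainy_days
--     return max_rainy_days
-- ===== SOURCE B (Python) =====
-- def max_rainy_days(s):
--     runs = "".join(c if c == 'R' else ' ' for c in s).split()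
--     return max((len(r) for r in runs), default=0)
-- ===== Notes on version B (the rewrite author's own statement) =====
-- stated objective: idiomatic
-- what changed: Replaces the manual two-counter scan with a build-runs-then-reduce pipeline: mask every non-rain character to a space, split the string into maximal rain runs, and take the maximum run length with default 0.
import Mathlib
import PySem

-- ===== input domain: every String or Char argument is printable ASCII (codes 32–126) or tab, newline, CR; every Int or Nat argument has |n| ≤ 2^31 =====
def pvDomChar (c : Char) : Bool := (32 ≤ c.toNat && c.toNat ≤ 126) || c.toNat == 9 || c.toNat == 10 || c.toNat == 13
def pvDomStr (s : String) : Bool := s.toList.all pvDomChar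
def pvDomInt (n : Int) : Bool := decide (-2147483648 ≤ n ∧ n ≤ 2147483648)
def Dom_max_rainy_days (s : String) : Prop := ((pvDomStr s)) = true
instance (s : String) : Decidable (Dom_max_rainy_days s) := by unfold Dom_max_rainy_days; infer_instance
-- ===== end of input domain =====

-- B replaces A's two-counter scan by mask-then-split-then-max (idiomatic 'build runs, reduce'); same O(n) cost.

-- ===== PORT A =====
-- the for-loop over s[i] with the two counters; the [] case performs the post-loop final update
def pvLoopA : List Char → Int → Int → Int
  | [], mx, cur => if cur > mx then cur else mx
  | c :: rest, mx, cur =>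
    if c = 'R' then pvLoopA rest mx (cur + 1)
    else pvLoopA rest (if cur > mx then cur else mx) 0

def max_rainy_days (s : String) : Int := pvLoopA s.toList 0 0

-- ===== PORT B =====
def max_rainy_days_alt (s : String) : Int :=
  let t := String.ofList (s.toList.map (fun c => if c = 'R' then c else ' '))
  let runs := PySem.Str.split₀ t
  ((PySem.List.max? (runs.map (fun r => PySem.Str.len r)) (fun x => x)).getD 0)

-- ===== PRECONDITION & SPEC =====
def Spec_max_rainy_days (s : String) (out : Int) : Prop := out = max_rainy_days_alt s
instance (s : String) (out : Int) : Decidable (Spec_max_rainy_days s out) := by unfold Spec_max_rainy_days; infer_instance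

-- ===== CLAIM (what is proved, stated in full; the proofs are below) =====
def Claim_equal_max_rainy_days : Prop := ∀ (s : String), Dom_max_rainy_days s → Spec_max_rainy_days s (max_rainy_days s)

-- ===== LEMMAS AND PROOFS =====

def pvMask (cs : List Char) : List Char := cs.map (fun c => if c = 'R' then c else ' ')

theorem pv_go_acc (cs cur acc) :
    PySem.Chars.split₀.go cs cur acc = acc.reverse ++ PySem.Chars.split₀.go cs cur [] := by
  induction cs generalizing cur acc with
  | nil =>
    simp only [PySem.Chars.split₀.go]
    split_ifs <;> simp
  | cons c rest ih =>
    simp only [PySem.Chars.split₀.go]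
    split_ifs with h1 h2
    · exact ih _ _
    · rw [ih [] (cur.reverse :: acc), ih [] [cur.reverse]]
      simp
    · exact ih _ _

theorem pv_if_max (mx cur : Int) : (if cur > mx then cur else mx) = max mx cur := by
  split_ifs <;> omega

theorem pv_loopA_go (cs : List Char) : ∀ (mx : Int) (curL : List Char), 0 ≤ mx →
    pvLoopA cs mx (curL.length : Int) =
      ((PySem.Chars.split₀.go (pvMask cs) curL []).map
        (fun r => (r.length : Int))).foldl max mx := by
  induction cs with
  | nil =>
    intro mx curL h
    simp only [pvLoopA, pvMask, List.map_nil, PySem.Chars.split₀.go, pv_if_max]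
    by_cases hc : curL = []
    · subst hc; simp; omega
    · rw [if_neg (show ¬(curL.isEmpty = true) by simpa using hc)]
      simp
  | cons c rest ih =>
    intro mx curL h
    by_cases hR : c = 'R'
    · subst hR
      have hmask : pvMask ('R' :: rest) = 'R' :: pvMask rest := by simp [pvMask]
      rw [hmask]
      have hsp : PySem.Chars.isspace 'R' = false := by decide
      simp only [pvLoopA, PySem.Chars.split₀.go, hsp, Bool.false_eq_true, if_false]
      have := ih mx ('R' :: curL) h
      simpa using this
    · have hmask : pvMask (c :: rest) = ' ' :: pvMask rest := by simp [pvMask, hR]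
      rw [hmask]
      have hsp : PySem.Chars.isspace ' ' = true := by decide
      simp only [pvLoopA, if_neg hR, PySem.Chars.split₀.go, hsp, if_true, pv_if_max]
      by_cases hc : curL = []
      · subst hc
        simp only [List.isEmpty_nil, if_true, List.length_nil, Nat.cast_zero]
        rw [show max mx (0 : Int) = mx by omega]
        simpa using ih mx [] h
      · rw [if_neg (show ¬(curL.isEmpty = true) by simpa using hc)]
        rw [pv_go_acc (pvMask rest) [] [curL.reverse]]
        simp only [List.reverse_cons, List.reverse_nil, List.nil_append, List.singleton_append,
          List.map_cons, List.foldl_cons, List.length_reverse]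
        simpa using ih (max mx (curL.length : Int)) [] (le_trans h (le_max_left _ _))

theorem pv_lens_bridge (cs : List Char) :
    (PySem.Str.split₀ (String.ofList (cs.map (fun c => if c = 'R' then c else ' ')))).map
      (fun r => PySem.Str.len r) =
      (PySem.Chars.split₀.go (pvMask cs) [] []).map (fun r => (r.length : Int)) := by
  have hb := PySem.Str.split₀_map_toList
    (String.ofList (cs.map (fun c => if c = 'R' then c else ' ')))
  have h2 := congrArg (List.map (fun l : List Char => (l.length : Int))) hb
  simp only [List.map_map] at h2
  have hmask : (String.ofList (cs.map (fun c => if c = 'R' then c else ' '))).toList = pvMask cs := by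
    simp [pvMask]
  rw [hmask] at h2
  simpa [PySem.Str.len, Function.comp, PySem.Chars.split₀] using h2

theorem pv_maxD (l : List (List Char)) :
    ((PySem.List.max? (l.map (fun r => (r.length : Int))) (fun x => x)).getD 0) =
      (l.map (fun r => (r.length : Int))).foldl max 0 := by
  cases l with
  | nil => simp [PySem.List.max?]
  | cons r rest =>
    simp only [List.map_cons, PySem.List.max?_id_cons, Option.getD_some, List.foldl_cons]
    rw [max_eq_right (Int.natCast_nonneg _)]

-- ===== VERDICT (by name: the statement is the Claim_ definition above) =====
theorem max_rainy_days_spec : Claim_equal_max_rainy_days := by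
  intro s _
  unfold Spec_max_rainy_days
  show max_rainy_days s = max_rainy_days_alt s
  simp only [max_rainy_days, max_rainy_days_alt]
  rw [pv_lens_bridge s.toList, pv_maxD]
  simpa using pv_loopA_go s.toList 0 [] (le_refl 0)
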